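-- pv_equiv track=rewrite | github.com/GMPavanLab/SOAPify | tests/conftest.py | __alph
-- ===== SOURCE A (Python) =====
-- def __alph(k):
--     "helper function to not overlap ref names in randomSOAPReferences"
--     from string import ascii_lowercase as alph
--
--     toret = ""
--     while k >= len(alph):
--         knew = k - len(alph)
--         toret += alph[k - knew - 1]
--         k -= len(alph)
--     toret += alph[k]
--     return toret
-- ===== SOURCE B (Python) =====
-- def __alph(k):
--     "helper function to not overlap ref names in randomSOAPReferences"
--     from string import ascii_lowercase as alph
--
--     if k < len(alph):
--         return alph[k]
--     return "z" * (k // len(alph)) + alph[k % len(alph)]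
-- ===== Notes on version B (the rewrite author's own statement) =====
-- stated objective: simpler
-- what changed: Replaces the while loop that appends one 'z' per 26 with a closed form: 'z' * (k // 26) + alph[k % 26], keeping direct indexing for k < 26.
-- outside the precondition, e.g. on __alph(-27): A raises IndexError, B raises IndexError
import Mathlib
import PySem

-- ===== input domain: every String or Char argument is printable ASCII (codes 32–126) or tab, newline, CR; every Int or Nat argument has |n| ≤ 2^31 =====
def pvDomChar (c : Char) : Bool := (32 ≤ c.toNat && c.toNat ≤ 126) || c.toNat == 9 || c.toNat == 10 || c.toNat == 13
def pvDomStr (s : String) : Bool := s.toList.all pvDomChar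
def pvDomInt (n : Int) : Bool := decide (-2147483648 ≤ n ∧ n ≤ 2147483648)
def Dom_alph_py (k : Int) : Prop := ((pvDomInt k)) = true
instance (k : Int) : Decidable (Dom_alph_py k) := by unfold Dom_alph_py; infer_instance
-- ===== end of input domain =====

-- B replaces A's while loop by the closed form 'z' * (k // 26) + alph[k % 26] (guarded by k < 26).

-- ===== PORT A =====
-- ascii_lowercase as a list of code points
def alphChars : List Char := "abcdefghijklmnopqrstuvwxyz".toList

-- the while loop of A: toret accumulates; at exit it appends alph[k].
-- (alph[...] is PySem.List.pyGet?; under Pre_ the index is always in range, .getD ' ' is never hit)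
def alphLoop (k : Int) (toret : List Char) : List Char :=
  if k ≥ 26 then
    alphLoop (k - 26) (toret ++ [(PySem.List.pyGet? alphChars (k - (k - 26) - 1)).getD ' '])
  else
    toret ++ [(PySem.List.pyGet? alphChars k).getD ' ']
termination_by k.toNat
decreasing_by omega

def alph_py (k : Int) : String := String.mk (alphLoop k [])

-- ===== PORT B =====
def alph_py_alt (k : Int) : String :=
  if k < 26 then
    String.mk [(PySem.List.pyGet? alphChars k).getD ' ']
  else
    String.mk (List.replicate (PySem.Int.floordiv k 26).toNat 'z'
               ++ [(PySem.List.pyGet? alphChars (PySem.Int.mod k 26)).getD ' '])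

-- ===== PRECONDITION & SPEC =====
-- Pre_ excludes exactly k ≤ -27, where alph[k] raises IndexError in A (and in B).
def Pre_alph_py (k : Int) : Prop := -26 ≤ k
instance (k : Int) : Decidable (Pre_alph_py k) := by unfold Pre_alph_py; infer_instance
def pvWitness_alph_py : Int := (55)

def Spec_alph_py (k : Int) (out : String) : Prop := out = alph_py_alt k
instance (k : Int) (out : String) : Decidable (Spec_alph_py k out) := by unfold Spec_alph_py; infer_instance

-- ===== CLAIM (what is proved, stated in full; the proofs are below) =====
def Claim_equal_alph_py : Prop := ∀ (k : Int), Dom_alph_py k → Pre_alph_py k → Spec_alph_py k (alph_py k)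

-- ===== LEMMAS AND PROOFS =====

-- accumulator lemma for A's loop
theorem alphLoop_acc (n : Nat) (k : Int) (hk : k.toNat = n) (t : List Char) :
    alphLoop k t = t ++ alphLoop k [] := by
  induction n using Nat.strong_induction_on generalizing k t with
  | _ n ih =>
    by_cases h : k ≥ 26
    · rw [alphLoop]
      simp only [h, if_pos]
      rw [ih (k - 26).toNat (by omega) (k - 26) rfl]
      conv_rhs => rw [alphLoop]
      simp only [h, if_pos, List.nil_append]
      rw [ih (k - 26).toNat (by omega) (k - 26) rfl ([(PySem.List.pyGet? alphChars (k - (k - 26) - 1)).getD ' '])]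
      simp
    · rw [alphLoop]
      conv_rhs => rw [alphLoop]
      simp [h]

-- closed form of A's loop for k ≥ 0
theorem alphLoop_closed (n : Nat) (k : Int) (hk : k.toNat = n) (h0 : 0 ≤ k) :
    alphLoop k [] = List.replicate (PySem.Int.floordiv k 26).toNat 'z'
      ++ [(PySem.List.pyGet? alphChars (PySem.Int.mod k 26)).getD ' '] := by
  induction n using Nat.strong_induction_on generalizing k with
  | _ n ih =>
    rw [alphLoop]
    by_cases h : k ≥ 26
    · simp only [h, if_pos]
      rw [alphLoop_acc (k - 26).toNat (k - 26) rfl]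
      have hidx : k - (k - 26) - 1 = (25 : Int) := by ring
      rw [hidx]
      rw [ih (k - 26).toNat (by omega) (k - 26) rfl (by omega)]
      have hd : PySem.Int.floordiv k 26 = PySem.Int.floordiv (k - 26) 26 + 1 := by
        rw [PySem.Int.floordiv_eq_ediv_of_pos (by norm_num),
            PySem.Int.floordiv_eq_ediv_of_pos (by norm_num)]
        omega
      have hm : PySem.Int.mod k 26 = PySem.Int.mod (k - 26) 26 := by
        rw [PySem.Int.mod_eq_emod_of_pos (by norm_num),
            PySem.Int.mod_eq_emod_of_pos (by norm_num)]
        omega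
      have hge : 0 ≤ PySem.Int.floordiv (k - 26) 26 := by
        rw [PySem.Int.floordiv_eq_ediv_of_pos (by norm_num)]
        omega
      rw [hd, hm]
      have : (PySem.Int.floordiv (k - 26) 26 + 1).toNat
           = (PySem.Int.floordiv (k - 26) 26).toNat + 1 := by omega
      rw [this, List.replicate_succ]
      simp [alphChars, PySem.List.pyGet?, PySem.List.pyIdx?]
    · simp only [h, if_neg, not_false_iff]
      have hd : PySem.Int.floordiv k 26 = 0 := by
        rw [PySem.Int.floordiv_eq_ediv_of_pos (by norm_num)]
        omega
      have hm : PySem.Int.mod k 26 = k := by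
        rw [PySem.Int.mod_eq_emod_of_pos (by norm_num)]
        omega
      rw [hd, hm]
      simp

-- ===== VERDICT (by name: the statement is the Claim_ definition above) =====
theorem alph_py_spec : Claim_equal_alph_py := by
  intro k _ hpre
  unfold Spec_alph_py alph_py alph_py_alt
  by_cases h : k < 26
  · rw [alphLoop]
    simp [show ¬ k ≥ 26 by omega, h]
  · rw [alphLoop_closed k.toNat k rfl (by omega)]
    simp [h]
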